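-- pv_equiv track=rewrite | github.com/KmXK/dvoretskii_bot | steward/helpers/bills_money.py | distribute_payment_amount
-- ===== SOURCE A (Python) =====
-- def distribute_payment_amount(
--     bills_with_debt: list[tuple[int, int]],
--     amount_minor: int,
-- ) -> tuple[list[tuple[int, int]], int]:
--     """Greedy-allocate `amount_minor` across bills' outstanding debts in caller-given order.
--
--     `bills_with_debt` is a list of (bill_id, debt_amount_minor); typically sorted FIFO
--     so older bills are paid off first. Returns (allocations, residual) where
--     `allocations` is a list of (bill_id, allocated_amount) and `residual` is leftover
--     overpayment (≥ 0).
--     """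
--     if amount_minor <= 0:
--         return [], 0
--     allocations: list[tuple[int, int]] = []
--     remaining = amount_minor
--     for bill_id, debt in bills_with_debt:
--         if remaining <= 0:
--             break
--         if debt <= 0:
--             continue
--         take = min(debt, remaining)
--         allocations.append((bill_id, take))
--         remaining -= take
--     return allocations, remaining
-- ===== SOURCE B (Python) =====
-- def distribute_payment_amount(
--     bills_with_debt: list[tuple[int, int]],
--     amount_minor: int,
-- ) -> tuple[list[tuple[int, int]], int]:
--     """Prefix-sum formulation: allocation of each positive-debt bill is a pure
--     function of the cumulative debt before it; no running 'remaining' state."""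
--     if amount_minor <= 0:
--         return [], 0
--     pos = [(bill_id, debt) for bill_id, debt in bills_with_debt if debt > 0]
--     prefixes = [0]
--     for _, debt in pos:
--         prefixes.append(prefixes[-1] + debt)
--     allocations = [
--         (bill_id, min(debt, amount_minor - before))
--         for (bill_id, debt), before in zip(pos, prefixes)
--         if before < amount_minor
--     ]
--     residual = max(0, amount_minor - prefixes[-1])
--     return allocations, residual
-- ===== Notes on version B (the rewrite author's own statement) =====
-- stated objective: alternative
-- what changed: Replaces the stateful loop with break/continue and a mutable 'remaining' counter by a filter of positive-debt bills, a prefix-sum table of their debts, and a comprehension computing each allocation as min(debt, amount - prefix_before), with residual = max(0, amount - total_positive_debt).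
import Mathlib
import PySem

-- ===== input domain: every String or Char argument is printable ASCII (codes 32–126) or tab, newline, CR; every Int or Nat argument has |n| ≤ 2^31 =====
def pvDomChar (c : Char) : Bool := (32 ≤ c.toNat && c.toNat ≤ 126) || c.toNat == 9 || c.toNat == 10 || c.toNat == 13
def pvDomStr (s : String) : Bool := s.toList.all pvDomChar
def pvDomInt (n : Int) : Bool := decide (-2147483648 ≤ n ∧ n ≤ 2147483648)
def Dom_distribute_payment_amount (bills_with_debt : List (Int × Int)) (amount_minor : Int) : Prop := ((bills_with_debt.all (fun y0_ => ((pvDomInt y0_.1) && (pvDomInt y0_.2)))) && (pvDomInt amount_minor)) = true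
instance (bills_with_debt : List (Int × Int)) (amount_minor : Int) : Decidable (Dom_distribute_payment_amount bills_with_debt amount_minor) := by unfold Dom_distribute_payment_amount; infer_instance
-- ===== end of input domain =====

-- B re-expresses A's stateful greedy loop (break/continue + mutable remaining) as a
-- filter of positive-debt bills, a prefix-sum table, and a per-bill closed form;
-- objective: alternative decomposition (same O(n) cost).

-- ===== PORT A =====
-- the for-loop of A: state = (allocations, remaining); break when remaining ≤ 0, skip debt ≤ 0
def pyA_loop : List (Int × Int) → List (Int × Int) → Int → (List (Int × Int)) × Int
  | [], allocations, remaining => (allocations, remaining)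
  | (bill_id, debt) :: rest, allocations, remaining =>
    if remaining ≤ 0 then (allocations, remaining)
    else if debt ≤ 0 then pyA_loop rest allocations remaining
    else
      let take := min debt remaining
      pyA_loop rest (allocations ++ [(bill_id, take)]) (remaining - take)

def distribute_payment_amount (bills_with_debt : List (Int × Int)) (amount_minor : Int) : (List (Int × Int)) × Int :=
  if amount_minor ≤ 0 then ([], 0)
  else pyA_loop bills_with_debt [] amount_minor

-- ===== PORT B =====
def distribute_payment_amount_alt (bills_with_debt : List (Int × Int)) (amount_minor : Int) : (List (Int × Int)) × Int :=
  if amount_minor ≤ 0 then ([], 0)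
  else
    let pos := bills_with_debt.filter (fun p => 0 < p.2)
    -- prefixes = [0]; for _, debt in pos: prefixes.append(prefixes[-1] + debt)
    let prefixes := pos.foldl (fun ps p => ps ++ [ps.getLast! + p.2]) [0]
    let allocations :=
      ((pos.zip prefixes).filter (fun x => x.2 < amount_minor)).map
        (fun x => (x.1.1, min x.1.2 (amount_minor - x.2)))
    (allocations, max 0 (amount_minor - prefixes.getLast!))

-- ===== PRECONDITION & SPEC =====
def Spec_distribute_payment_amount (bills_with_debt : List (Int × Int)) (amount_minor : Int) (out : (List (Int × Int)) × Int) : Prop := out = distribute_payment_amount_alt bills_with_debt amount_minor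
instance (bills_with_debt : List (Int × Int)) (amount_minor : Int) (out : (List (Int × Int)) × Int) : Decidable (Spec_distribute_payment_amount bills_with_debt amount_minor out) := by unfold Spec_distribute_payment_amount; infer_instance

-- ===== CLAIM (what is proved, stated in full; the proofs are below) =====
def Claim_equal_distribute_payment_amount : Prop := ∀ (bills_with_debt : List (Int × Int)) (amount_minor : Int), Dom_distribute_payment_amount bills_with_debt amount_minor → Spec_distribute_payment_amount bills_with_debt amount_minor (distribute_payment_amount bills_with_debt amount_minor)

-- ===== LEMMAS AND PROOFS =====

theorem getLast!_concat_int (l : List Int) (a : Int) : (l ++ [a]).getLast! = a := by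
  induction l with
  | nil => rfl
  | cons x xs ih =>
      rw [List.cons_append, List.getLast!_cons_eq_getLastD]
      simp [List.getLastD_eq_getLast?, List.getLast?_append]

theorem getLast!_cons_cons_int (x y : Int) (l : List Int) :
    (x :: y :: l).getLast! = (y :: l).getLast! := by
  rw [List.getLast!_cons_eq_getLastD, List.getLast!_cons_eq_getLastD]
  simp only [List.getLastD_eq_getLast?]
  cases l with
  | nil => simp
  | cons a t =>
      rw [List.getLast?_cons_cons]
      cases h : (a :: t).getLast? with
      | none => simp [List.getLast?_eq_none_iff] at h
      | some z => simp

-- running sums of debts, starting from s (excluding s itself)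
def scanTail (s : Int) : List (Int × Int) → List Int
  | [] => []
  | p :: rest => (s + p.2) :: scanTail (s + p.2) rest

theorem scanTail_getLast (s : Int) (l : List (Int × Int)) :
    (s :: scanTail s l).getLast! = s + (l.map (·.2)).sum := by
  induction l generalizing s with
  | nil => simp [scanTail, List.getLast!]
  | cons p rest ih =>
      simp only [scanTail, List.map, List.sum_cons]
      rw [getLast!_cons_cons_int, ih (s + p.2)]
      ring

theorem scanTail_ge (l : List (Int × Int)) (s : Int) (hpos : ∀ p ∈ l, 0 ≤ p.2) :
    ∀ x ∈ scanTail s l, s ≤ x := by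
  induction l generalizing s with
  | nil => simp [scanTail]
  | cons p rest ih =>
      intro x hx
      simp only [scanTail, List.mem_cons] at hx
      have hp : 0 ≤ p.2 := hpos p (by simp)
      rcases hx with h | h
      · omega
      · have := ih (s + p.2) (fun q hq => hpos q (by simp [hq])) x h
        omega

theorem fold_pref (l : List (Int × Int)) (init : List Int) :
    l.foldl (fun ps p => ps ++ [ps.getLast! + p.2]) init
      = init ++ scanTail init.getLast! l := by
  induction l generalizing init with
  | nil => simp [scanTail]
  | cons p rest ih =>
      simp only [List.foldl, scanTail]
      rw [ih, getLast!_concat_int]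
      simp

-- the loop returns immediately when remaining ≤ 0
theorem pyA_loop_nonpos (l : List (Int × Int)) (acc : List (Int × Int)) (r : Int)
    (hr : r ≤ 0) : pyA_loop l acc r = (acc, r) := by
  cases l with
  | nil => simp [pyA_loop]
  | cons p rest => obtain ⟨a, b⟩ := p; simp [pyA_loop, hr]

-- the loop skips non-positive debts: running on the filtered list is the same
theorem pyA_loop_filter (bills : List (Int × Int)) (acc : List (Int × Int)) (r : Int) :
    pyA_loop bills acc r = pyA_loop (bills.filter (fun p => 0 < p.2)) acc r := by
  induction bills generalizing acc r with
  | nil => simp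
  | cons p rest ih =>
      obtain ⟨bid, debt⟩ := p
      by_cases hr : r ≤ 0
      · rw [pyA_loop_nonpos _ _ _ hr, pyA_loop_nonpos _ _ _ hr]
      · by_cases hd : debt ≤ 0
        · have hnp : ¬ (0 < ((bid, debt) : Int × Int).2) := by simpa using hd
          simp only [List.filter_cons, decide_eq_true_eq]
          rw [if_neg hnp]
          simp only [pyA_loop, if_neg hr, if_pos hd]
          exact ih acc r
        · have hp : (0 < ((bid, debt) : Int × Int).2) := by simpa using hd
          simp only [List.filter_cons, decide_eq_true_eq]
          rw [if_pos hp]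
          simp only [pyA_loop, if_neg hr, if_neg hd]
          exact ih _ _

-- main invariant: on a list of positive-debt bills with consumed prefix s < a
theorem pyA_loop_main (pos : List (Int × Int)) :
    ∀ (acc : List (Int × Int)) (a s : Int), (∀ p ∈ pos, 0 < p.2) → s < a →
    pyA_loop pos acc (a - s) =
      (acc ++ (((pos.zip (s :: scanTail s pos)).filter (fun x => x.2 < a)).map
          (fun x => (x.1.1, min x.1.2 (a - x.2)))),
       max 0 (a - (s + (pos.map (·.2)).sum))) := by
  induction pos with
  | nil =>
      intro acc a s _ hs
      simp [pyA_loop, scanTail]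
      omega
  | cons p rest ih =>
      intro acc a s hpos hs
      obtain ⟨bid, debt⟩ := p
      have hd : 0 < debt := hpos (bid, debt) (by simp)
      have hrest : ∀ q ∈ rest, 0 < q.2 := fun q hq => hpos q (by simp [hq])
      have hr : ¬ (a - s ≤ 0) := by omega
      simp only [pyA_loop, if_neg hr, if_neg (by omega : ¬ debt ≤ 0)]
      simp only [scanTail, List.zip_cons_cons, List.filter_cons, List.map, List.sum_cons]
      rw [if_pos (by simpa using hs)]
      by_cases hcase : s + debt < a
      · -- this bill is paid in full; continue with consumed prefix s + debt
        have harg : a - s - min debt (a - s) = a - (s + debt) := by omega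
        rw [harg, ih (acc ++ [(bid, min debt (a - s))]) a (s + debt) hrest hcase]
        simp only [List.map_cons, List.append_assoc, List.cons_append, List.nil_append,
          Prod.mk.injEq]
        exact ⟨trivial, by congr 1; ring⟩
      · -- this bill absorbs everything; remaining becomes 0 and the loop stops
        have harg : a - s - min debt (a - s) = 0 := by omega
        rw [harg, pyA_loop_nonpos _ _ _ le_rfl]
        have hdrop : (rest.zip ((s + debt) :: scanTail (s + debt) rest)).filter
            (fun x => x.2 < a) = [] := by
          rw [List.filter_eq_nil_iff]
          intro x hx
          have hmem := (List.of_mem_zip hx).2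
          have hge : s + debt ≤ x.2 := by
            rcases List.mem_cons.mp hmem with h | h
            · omega
            · exact scanTail_ge rest (s + debt) (fun q hq => le_of_lt (hrest q hq)) x.2 h
          simp only [decide_eq_true_eq]
          omega
        rw [hdrop]
        have hsum : 0 ≤ (rest.map (·.2)).sum :=
          List.sum_nonneg (by
            intro x hx
            obtain ⟨q, hq, rfl⟩ := List.mem_map.mp hx
            exact le_of_lt (hrest q hq))
        simp only [List.map_cons, List.map_nil, Prod.mk.injEq]
        refine ⟨by simp, ?_⟩
        omega

-- ===== VERDICT (by name: the statement is the Claim_ definition above) =====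
theorem distribute_payment_amount_spec : Claim_equal_distribute_payment_amount := by
  intro bills amount _
  unfold Spec_distribute_payment_amount distribute_payment_amount distribute_payment_amount_alt
  by_cases h : amount ≤ 0
  · simp [h]
  · simp only [if_neg h]
    rw [pyA_loop_filter]
    set pos := bills.filter (fun p => 0 < p.2) with hpos_def
    have hpos : ∀ p ∈ pos, 0 < p.2 := by
      intro p hp
      have := List.of_mem_filter hp
      simpa using this
    have key := pyA_loop_main pos [] amount 0 hpos (by omega)
    simp only [sub_zero, zero_add, List.nil_append] at key
    rw [key, fold_pref]
    have h0 : ([0] : List Int).getLast! = 0 := rfl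
    rw [h0, List.singleton_append, scanTail_getLast]
    simp
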